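-- pv_equiv track=rewrite | github.com/bakerhase/SimonIT-Share-Automation | SimonIT-Share-Automation.py | titleparse
-- ===== SOURCE A (Python) =====
-- def titleparse(page_title):
--     endidx = page_title.index("'")
--     reverse_title = ''
--     flag = 0
--     idxadd = -1
--     while flag == 0:
--         if page_title[endidx+idxadd] == ' ' or (endidx+idxadd) == -1:
--             flag = 1
--         else:
--             reverse_title+=page_title[endidx+idxadd]
--             idxadd += -1
--
--     course_title = reverse_title[::-1]
--     return course_title
-- ===== SOURCE B (Python) =====
-- def titleparse(page_title):
--     endidx = page_title.index("'")
--     before = page_title[:endidx]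
--     return before[before.rfind(' ') + 1:]
-- ===== Notes on version B (the rewrite author's own statement) =====
-- stated objective: simpler
-- what changed: Replaces the backward character-walking accumulator loop (build reversed string, then reverse) with a direct prefix slice up to the apostrophe plus rfind-based suffix slice, keeping no loop state.
import Mathlib
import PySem

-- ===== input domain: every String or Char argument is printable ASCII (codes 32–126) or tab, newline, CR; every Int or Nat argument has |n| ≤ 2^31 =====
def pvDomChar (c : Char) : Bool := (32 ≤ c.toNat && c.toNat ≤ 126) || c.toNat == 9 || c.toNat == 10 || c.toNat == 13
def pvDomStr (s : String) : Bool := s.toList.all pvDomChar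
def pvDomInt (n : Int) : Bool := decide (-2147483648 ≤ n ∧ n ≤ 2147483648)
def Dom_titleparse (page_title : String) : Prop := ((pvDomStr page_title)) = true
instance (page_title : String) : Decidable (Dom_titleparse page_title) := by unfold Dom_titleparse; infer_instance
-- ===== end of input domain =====

-- B replaces A's backward character-walking accumulator loop (+ final reversal) with a
-- direct prefix slice up to the apostrophe and an rfind-based suffix slice; objective: simpler.

-- ===== PORT A =====
-- A's while loop: walk backwards from the apostrophe, accumulating characters until a space
-- is read or the index reaches -1; the read page_title[endidx+idxadd] is PySem.List.pyGet?
-- (none = IndexError, unreachable on inputs satisfying Pre_titleparse).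
def titleparseLoopA (s : List Char) (i : Int) : List Char :=
  match h : PySem.List.pyGet? s i with
  | none => []     -- IndexError; never reached on inputs satisfying Pre_titleparse
  | some c =>
      if c = ' ' ∨ i = -1 then []
      else c :: titleparseLoopA s (i - 1)
termination_by (i + s.length + 1).toNat
decreasing_by
  simp only [PySem.List.pyGet?, PySem.List.pyIdx?] at h
  split_ifs at h <;> simp_all <;> omega

def titleparse (page_title : String) : String :=
  let s := page_title.toList
  let endidx := PySem.Chars.find s ['\'']          -- page_title.index("'")
  let reverse_title := titleparseLoopA s (endidx - 1)
  String.ofList reverse_title.reverse              -- reverse_title[::-1] (s[::-1] is reverse)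

-- ===== PORT B =====
def titleparse_alt (page_title : String) : String :=
  let s := page_title.toList
  let endidx := PySem.Chars.find s ['\'']          -- page_title.index("'")
  let before := PySem.List.slice s none (some endidx)          -- page_title[:endidx]
  String.ofList (PySem.List.slice before (some (PySem.Chars.rfind before [' '] + 1)) none)
      -- before[before.rfind(' ') + 1:]

-- ===== PRECONDITION & SPEC =====
-- Pre_ excludes exactly the strings containing no apostrophe, on which Python's .index raises ValueError.
def Pre_titleparse (page_title : String) : Prop := PySem.Str.isIn "'" page_title = true
instance (page_title : String) : Decidable (Pre_titleparse page_title) := by unfold Pre_titleparse; infer_instance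

def pvWitness_titleparse : String := "John Smith's course"

def Spec_titleparse (page_title : String) (out : String) : Prop := out = titleparse_alt page_title
instance (page_title : String) (out : String) : Decidable (Spec_titleparse page_title out) := by unfold Spec_titleparse; infer_instance

-- ===== CLAIM (what is proved, stated in full; the proofs are below) =====
def Claim_equal_titleparse : Prop := ∀ (page_title : String), Dom_titleparse page_title → Pre_titleparse page_title → Spec_titleparse page_title (titleparse page_title)

-- ===== LEMMAS AND PROOFS =====

-- one-step equations for PySem.Chars.rfind.go
theorem rfind_go_zero (s sub : List Char) :
    PySem.Chars.rfind.go s sub 0 = if sub.isPrefixOf s then 0 else -1 := rfl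

theorem rfind_go_succ (s sub : List Char) (j : Nat) :
    PySem.Chars.rfind.go s sub (j + 1)
      = if sub.isPrefixOf (s.drop (j + 1)) then ((j : Int) + 1) else PySem.Chars.rfind.go s sub j := rfl

theorem rfind_go_bounds (s sub : List Char) (j : Nat) :
    -1 ≤ PySem.Chars.rfind.go s sub j ∧ PySem.Chars.rfind.go s sub j ≤ j := by
  induction j with
  | zero => rw [rfind_go_zero]; split <;> simp
  | succ j ih => rw [rfind_go_succ]; split <;> [skip; skip] <;> push_cast <;> omega

theorem prefix_space_append (v : List Char) (c : Char) (hc : c ≠ ' ') :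
    [' '].isPrefixOf (v ++ [c]) = [' '].isPrefixOf v := by
  cases v with
  | nil => simp [List.isPrefixOf]; exact fun h => hc h.symm
  | cons h t => simp [List.isPrefixOf]

theorem rfind_go_append (v : List Char) (c : Char) (hc : c ≠ ' ') :
    ∀ j, j ≤ v.length →
      PySem.Chars.rfind.go (v ++ [c]) [' '] j = PySem.Chars.rfind.go v [' '] j := by
  intro j
  induction j with
  | zero =>
      intro _
      rw [rfind_go_zero, rfind_go_zero, prefix_space_append v c hc]
  | succ j ih =>
      intro hj
      rw [rfind_go_succ, rfind_go_succ, List.drop_append_of_le_length hj,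
        prefix_space_append _ c hc, ih (by omega)]

theorem rfind_go_hit (s sub : List Char) (j : Nat) (h : sub.isPrefixOf (s.drop j) = true) :
    PySem.Chars.rfind.go s sub j = j := by
  cases j with
  | zero => rw [rfind_go_zero]; simpa using h
  | succ j => rw [rfind_go_succ, if_pos h]; push_cast; ring

theorem rfind_space_succ_le (v : List Char) :
    PySem.Chars.rfind v [' '] + 1 ≤ (v.length : Int) := by
  show PySem.Chars.rfind.go v [' '] v.length + 1 ≤ (v.length : Int)
  cases hn : v.length with
  | zero =>
      have hv : v = [] := List.length_eq_zero_iff.mp hn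
      subst hv
      rw [rfind_go_zero]
      simp [List.isPrefixOf]
  | succ m =>
      rw [rfind_go_succ]
      have hdrop : v.drop (m + 1) = [] := List.drop_eq_nil_iff.mpr (by omega)
      rw [hdrop]
      have : ([' '] : List Char).isPrefixOf [] = false := by simp [List.isPrefixOf]
      rw [this]
      simp only [Bool.false_eq_true, if_false]
      have := (rfind_go_bounds v [' '] m).2
      omega

-- B's suffix slice is the reversed takeWhile of the reversed prefix.
theorem slice_rfind_eq (u : List Char) :
    PySem.List.slice u (some (PySem.Chars.rfind u [' '] + 1)) none
      = ((u.reverse).takeWhile (fun c => c ≠ ' ')).reverse := by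
  induction u using List.reverseRecOn with
  | nil =>
      have h0 : PySem.Chars.rfind ([] : List Char) [' '] = -1 := by
        show PySem.Chars.rfind.go ([] : List Char) [' '] 0 = -1
        rw [rfind_go_zero]; simp [List.isPrefixOf]
      rw [h0]
      have h1 : (-1 : Int) + 1 = ((0 : Nat) : Int) := by norm_num
      rw [h1, PySem.List.slice_from_natCast]
      simp
  | append_singleton v c ih =>
      have hlen : (v ++ [c]).length = v.length + 1 := by simp
      have hstep : PySem.Chars.rfind (v ++ [c]) [' ']
          = PySem.Chars.rfind.go (v ++ [c]) [' '] v.length := by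
        show PySem.Chars.rfind.go (v ++ [c]) [' '] ((v ++ [c]).length) = _
        rw [hlen, rfind_go_succ]
        have hdrop : (v ++ [c]).drop (v.length + 1) = [] :=
          List.drop_eq_nil_iff.mpr (by simp)
        rw [hdrop]
        have : ([' '] : List Char).isPrefixOf [] = false := by simp [List.isPrefixOf]
        rw [this]
        simp
      by_cases hc : c = ' '
      · -- last char of the prefix is the space: result is empty
        subst hc
        have hhit : PySem.Chars.rfind (v ++ [' ']) [' '] = (v.length : Int) := by
          rw [hstep]
          exact rfind_go_hit _ _ _ (by simp [List.isPrefixOf])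
        rw [hhit]
        have h1 : ((v.length : Int)) + 1 = ((v.length + 1 : Nat) : Int) := by push_cast; ring
        rw [h1, PySem.List.slice_from_natCast]
        simp
      · -- last char kept: recurse on v
        have heq : PySem.Chars.rfind (v ++ [c]) [' '] = PySem.Chars.rfind v [' '] := by
          rw [hstep, rfind_go_append v c hc v.length le_rfl]
          rfl
        rw [heq]
        have hb := rfind_go_bounds v [' '] v.length
        have hnn : (0:Int) ≤ PySem.Chars.rfind v [' '] + 1 := by
          have : -1 ≤ PySem.Chars.rfind v [' '] := hb.1
          omega
        have hle : (PySem.Chars.rfind v [' '] + 1).toNat ≤ v.length := by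
          have := rfind_space_succ_le v
          omega
        rw [PySem.List.slice_from _ hnn, List.drop_append_of_le_length hle]
        rw [PySem.List.slice_from _ hnn] at ih
        rw [ih]
        simp [hc]

-- A's loop collects, in reverse, the characters before position n until a space or the start.
theorem loopA_eq_takeWhile (s : List Char) :
    ∀ n : Nat, n ≤ s.length →
      titleparseLoopA s ((n : Int) - 1) = ((s.take n).reverse).takeWhile (fun c => c ≠ ' ') := by
  intro n
  induction n with
  | zero =>
      intro _
      have h0 : ((0 : Nat) : Int) - 1 = -1 := by norm_num
      rw [h0, titleparseLoopA]
      split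
      · simp
      · rw [if_pos (Or.inr rfl)]; simp
  | succ n ih =>
      intro h
      have hn : n < s.length := by omega
      have hcast : ((n + 1 : Nat) : Int) - 1 = (n : Int) := by push_cast; ring
      rw [hcast, titleparseLoopA]
      have hget : PySem.List.pyGet? s ((n : Nat) : Int) = some s[n] := by
        rw [PySem.List.pyGet?_natCast]
        simp [hn]
      have htake : s.take (n + 1) = s.take n ++ [s[n]] := by
        rw [List.take_add_one]
        simp [hn]
      split
      · rename_i heq; rw [hget] at heq; cases heq
      · rename_i c heq
        rw [hget] at heq
        injection heq with heq
        subst heq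
        by_cases hsp : s[n] = ' '
        · rw [if_pos (Or.inl hsp), htake]
          simp [hsp]
        · rw [if_neg (by simp [hsp]), ih (by omega), htake, List.reverse_append,
            List.reverse_singleton, List.singleton_append,
            List.takeWhile_cons_of_pos (by simp [hsp])]

-- ===== VERDICT (by name: the statement is the Claim_ definition above) =====
theorem titleparse_spec : Claim_equal_titleparse := by
  intro page_title _ hpre
  unfold Pre_titleparse at hpre
  unfold Spec_titleparse
  simp only [titleparse, titleparse_alt]
  have hinf : ['\''] <:+: page_title.toList := by
    have := (PySem.Str.isIn_iff_infix _ _).mp hpre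
    simpa using this
  set s := page_title.toList
  have hfind : 0 ≤ PySem.Chars.find s ['\''] := (PySem.Chars.find_nonneg_iff _ _).mpr hinf
  have hfle : PySem.Chars.find s ['\''] ≤ (s.length : Int) := PySem.Chars.find_le_length s ['\'']
  set e := PySem.Chars.find s ['\'']
  have hn : e = ((e.toNat : Nat) : Int) := by omega
  have hnle : e.toNat ≤ s.length := by omega
  have hbefore : PySem.List.slice s none (some e) = s.take e.toNat :=
    PySem.List.slice_to s hfind
  have hA : titleparseLoopA s (e - 1)
      = ((s.take e.toNat).reverse).takeWhile (fun c => c ≠ ' ') := by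
    rw [hn]
    exact loopA_eq_takeWhile s e.toNat hnle
  rw [hA, hbefore, slice_rfind_eq (s.take e.toNat)]
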